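-- pv_equiv track=rewrite | github.com/macentr/shifr_vijnera | cod.py | decode_val
-- ===== SOURCE A (Python) =====
-- def form_dict():
--     d = {}
--     iter = 0
--     for i in range(1072,1103):
--         d[iter] = chr(i)
--         iter = iter +1
--     return d
--
-- def decode_val(list_in):
--     list_code = []
--     lent = len(list_in)
--     d = form_dict()
--
--     for i in range(lent):
--         for value in d:
--             if list_in[i] == value:
--                list_code.append(d[value])
--     return list_code
-- ===== SOURCE B (Python) =====
-- def decode_val(list_in):
--     # Simpler: the alphabet is the contiguous range chr(1072)..chr(1102),
--     # so compute chr(1072+x) directly instead of scanning a 31-key dict.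
--     return [chr(1072 + x) for x in list_in if 0 <= x <= 30]
-- ===== Notes on version B (the rewrite author's own statement) =====
-- stated objective: simpler
-- what changed: Replaced the 31-key dict built by form_dict plus an inner linear scan over its keys with a single list comprehension that computes chr(1072+x) arithmetically for in-range codes.
import Mathlib
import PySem

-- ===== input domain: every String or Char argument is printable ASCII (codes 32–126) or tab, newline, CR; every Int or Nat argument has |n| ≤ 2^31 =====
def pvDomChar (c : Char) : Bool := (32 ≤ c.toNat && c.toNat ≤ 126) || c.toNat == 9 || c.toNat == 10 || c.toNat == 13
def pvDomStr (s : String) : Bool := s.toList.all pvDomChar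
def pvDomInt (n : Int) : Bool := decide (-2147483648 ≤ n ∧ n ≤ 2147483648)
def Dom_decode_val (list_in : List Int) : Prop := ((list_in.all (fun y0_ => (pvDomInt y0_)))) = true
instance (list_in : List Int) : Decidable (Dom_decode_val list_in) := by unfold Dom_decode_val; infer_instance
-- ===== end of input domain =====

-- B replaces A's 31-key dict and inner key scan with a direct arithmetic chr(1072+x) comprehension (simpler).


-- ===== PORT A =====
def form_dict : PySem.Dict Int String :=
  ((PySem.List.pyRange 1072 1103 1).foldl
    (fun (st : PySem.Dict Int String × Int) i =>
      (st.1.insert st.2 (String.mk [Char.ofNat i.toNat]), st.2 + 1))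
    (PySem.Dict.empty, 0)).1

def decode_val (list_in : List Int) : List String :=
  let lent : Int := list_in.length
  let d := form_dict
  (PySem.List.pyRange 0 lent 1).foldl
    (fun list_code i =>
      d.keys.foldl
        (fun lc value =>
          if PySem.List.pyGetD list_in i 0 = value then lc ++ [d.getD value ""] else lc)
        list_code)
    []

-- ===== PORT B =====
def decode_val_alt (list_in : List Int) : List String :=
  list_in.filterMap (fun x =>
    if 0 ≤ x ∧ x ≤ 30 then some (String.mk [Char.ofNat (1072 + x).toNat]) else none)

-- ===== PRECONDITION & SPEC =====
def Spec_decode_val (list_in : List Int) (out : List String) : Prop := out = decode_val_alt list_in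
instance (list_in : List Int) (out : List String) : Decidable (Spec_decode_val list_in out) := by unfold Spec_decode_val; infer_instance

-- ===== CLAIM (what is proved, stated in full; the proofs are below) =====
def Claim_equal_decode_val : Prop := ∀ (list_in : List Int), Dom_decode_val list_in → Spec_decode_val list_in (decode_val list_in)

-- ===== LEMMAS AND PROOFS =====

theorem form_dict_keys : form_dict.keys = PySem.List.pyRange 0 31 1 := by decide

theorem mem_form_dict_keys (x : Int) : x ∈ form_dict.keys ↔ 0 ≤ x ∧ x < 31 := by
  rw [form_dict_keys, PySem.List.mem_pyRange_one]

theorem form_dict_getD (x : Int) (h0 : 0 ≤ x) (h1 : x ≤ 30) :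
    form_dict.getD x "" = String.mk [Char.ofNat (1072 + x).toNat] := by
  interval_cases x <;> decide

-- a Nodup list filtered to the elements equal to x is [x] or []
theorem filter_eq_of_nodup {α : Type} [DecidableEq α] (l : List α) (hn : l.Nodup) (x : α) :
    l.filter (fun v => decide (x = v)) = if x ∈ l then [x] else [] := by
  induction l with
  | nil => simp
  | cons a t ih =>
    rcases List.nodup_cons.mp hn with ⟨ha, ht⟩
    by_cases hxa : x = a
    · subst hxa
      simp [List.filter_cons, ih ht, ha]
    · simp [List.filter_cons, hxa, ih ht]

-- the inner scan over the dict's keys equals the arithmetic one-shot result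
theorem inner_scan (x : Int) (acc : List String) :
    form_dict.keys.foldl
      (fun lc value => if x = value then lc ++ [form_dict.getD value ""] else lc) acc
    = acc ++ (if 0 ≤ x ∧ x ≤ 30 then [String.mk [Char.ofNat (1072 + x).toNat]] else []) := by
  rw [PySem.List.foldl_append_ite (fun v => x = v) (fun v => form_dict.getD v "")]
  rw [filter_eq_of_nodup _ (by decide) x]
  by_cases h : 0 ≤ x ∧ x ≤ 30
  · have hm : x ∈ form_dict.keys := (mem_form_dict_keys x).mpr ⟨h.1, by omega⟩
    simp [hm, h, form_dict_getD x h.1 h.2]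
  · have hm : x ∉ form_dict.keys := by
      rw [mem_form_dict_keys]; omega
    simp [hm, h]

theorem foldl_inner (l : List Int) (acc : List String) :
    l.foldl
      (fun list_code x =>
        form_dict.keys.foldl
          (fun lc value => if x = value then lc ++ [form_dict.getD value ""] else lc)
          list_code) acc
    = acc ++ l.filterMap (fun x =>
        if 0 ≤ x ∧ x ≤ 30 then some (String.mk [Char.ofNat (1072 + x).toNat]) else none) := by
  induction l generalizing acc with
  | nil => simp
  | cons a t ih =>
    rw [List.foldl_cons, ih, inner_scan, List.filterMap_cons]
    by_cases h : 0 ≤ a ∧ a ≤ 30 <;> simp [h]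

-- ===== VERDICT (by name: the statement is the Claim_ definition above) =====
theorem decode_val_spec : Claim_equal_decode_val := by
  intro list_in _
  unfold Spec_decode_val decode_val decode_val_alt
  rw [PySem.List.foldl_pyRange_zero_pyGetD' list_in 0
      (fun list_code x =>
        form_dict.keys.foldl
          (fun lc value => if x = value then lc ++ [form_dict.getD value ""] else lc)
          list_code) []]
  exact foldl_inner list_in []
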